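-- pv_equiv track=rewrite | github.com/PurthaShaariyaar/OA | getMinCost.py | getMinCost
-- ===== SOURCE A (Python) =====
-- def getMinCost(arr):
--   n = len(arr)
--
--   initCost = sum((arr[i] - arr[i+1])**2 for i in range(n - 1))
--
--   minCost = initCost
--
--   for i in range(n - 1):
--     cost = initCost - (arr[i] - arr[i + 1])**2 + (arr[i] - arr[i + 1]//2)**2 + (arr[i + 1]//2 - arr[i + 1])**2
--     minCost = min(minCost, cost)
--   return minCost
-- ===== SOURCE B (Python) =====
-- def getMinCost(arr):
--   def cost(seq):
--     return sum((x - y) ** 2 for x, y in zip(seq, seq[1:]))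
--
--   best = cost(arr)
--   for i in range(len(arr) - 1):
--     cand = arr[:i + 1] + [arr[i + 1] // 2] + arr[i + 1:]
--     best = min(best, cost(cand))
--   return best
-- ===== Notes on version B (the rewrite author's own statement) =====
-- stated objective: alternative
-- what changed: B recomputes each candidate's full adjacent-diff-squared cost on the explicitly built inserted sequence arr[:i+1]+[arr[i+1]//2]+arr[i+1:], instead of A's O(1) incremental edge-delta update of the precomputed baseline.
import Mathlib
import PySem

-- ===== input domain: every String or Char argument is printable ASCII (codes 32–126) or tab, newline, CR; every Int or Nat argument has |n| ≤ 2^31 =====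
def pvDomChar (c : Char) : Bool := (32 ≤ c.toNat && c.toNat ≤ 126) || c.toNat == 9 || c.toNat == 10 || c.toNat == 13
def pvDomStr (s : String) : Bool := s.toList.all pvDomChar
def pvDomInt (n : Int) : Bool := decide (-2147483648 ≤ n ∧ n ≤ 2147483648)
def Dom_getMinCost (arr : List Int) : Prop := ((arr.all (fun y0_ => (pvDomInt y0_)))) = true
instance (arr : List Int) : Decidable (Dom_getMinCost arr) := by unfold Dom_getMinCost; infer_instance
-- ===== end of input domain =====

-- B rebuilds each candidate sequence (with arr[i+1]//2 inserted) and recomputes its full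
-- adjacent-diff-squared cost, replacing A's incremental O(1) edge-delta update (objective: alternative).

-- ===== PORT A =====
-- indices i and i+1 produced by range(n-1) are always in range, so getD _ 0 = Python's arr[i]
def getMinCost (arr : List Int) : Int :=
  let n := arr.length
  let initCost : Int := ((List.range (n - 1)).map
    (fun i => (arr.getD i 0 - arr.getD (i + 1) 0) ^ 2)).sum
  (List.range (n - 1)).foldl (fun minCost i =>
    min minCost (initCost - (arr.getD i 0 - arr.getD (i + 1) 0) ^ 2
      + (arr.getD i 0 - PySem.Int.floordiv (arr.getD (i + 1) 0) 2) ^ 2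
      + (PySem.Int.floordiv (arr.getD (i + 1) 0) 2 - arr.getD (i + 1) 0) ^ 2)) initCost

-- ===== PORT B =====
-- sum((x-y)**2 for x, y in zip(seq, seq[1:]))
def pvCost (seq : List Int) : Int :=
  ((seq.zip seq.tail).map (fun p => (p.1 - p.2) ^ 2)).sum

-- arr[:i+1] = take (i+1), arr[i+1:] = drop (i+1): exact for these nonnegative indices
def getMinCost_alt (arr : List Int) : Int :=
  let best := pvCost arr
  (List.range (arr.length - 1)).foldl (fun best i =>
    min best (pvCost (arr.take (i + 1)
      ++ PySem.Int.floordiv (arr.getD (i + 1) 0) 2 :: arr.drop (i + 1)))) best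

-- ===== PRECONDITION & SPEC =====
def Spec_getMinCost (arr : List Int) (out : Int) : Prop := out = getMinCost_alt arr
instance (arr : List Int) (out : Int) : Decidable (Spec_getMinCost arr out) := by unfold Spec_getMinCost; infer_instance

-- ===== CLAIM (what is proved, stated in full; the proofs are below) =====
def Claim_equal_getMinCost : Prop := ∀ (arr : List Int), Dom_getMinCost arr → Spec_getMinCost arr (getMinCost arr)

-- ===== LEMMAS AND PROOFS =====

theorem pvCost_cons_cons (a b : Int) (l : List Int) :
    pvCost (a :: b :: l) = (a - b) ^ 2 + pvCost (b :: l) := by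
  simp [pvCost]

-- A's range-indexed baseline sum equals B's zip-based cost of the whole array
theorem initCost_eq (xs : List Int) :
    ((List.range (xs.length - 1)).map
      (fun i => (xs.getD i 0 - xs.getD (i + 1) 0) ^ 2)).sum = pvCost xs := by
  induction xs with
  | nil => simp [pvCost]
  | cons a t ih =>
    cases t with
    | nil => simp [pvCost]
    | cons b t' =>
      rw [pvCost_cons_cons, ← ih]
      simp [List.range_succ_eq_map, Function.comp_def]

-- recomputed cost of the candidate = baseline cost adjusted by A's three-term delta
theorem insert_cost (i : Nat) (xs : List Int) (h : Int) (hi : i + 1 < xs.length) :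
    pvCost (xs.take (i + 1) ++ h :: xs.drop (i + 1))
      = pvCost xs - (xs.getD i 0 - xs.getD (i + 1) 0) ^ 2
        + (xs.getD i 0 - h) ^ 2 + (h - xs.getD (i + 1) 0) ^ 2 := by
  induction i generalizing xs with
  | zero =>
    match xs, hi with
    | a :: b :: t, _ =>
      simp only [List.take, List.drop, List.cons_append, List.nil_append,
        pvCost_cons_cons, List.getD_cons_zero, List.getD_cons_succ]
      ring
  | succ j ih =>
    match xs, hi with
    | a :: b :: t, hi =>
      have hj : j + 1 < (b :: t).length := by
        simpa [Nat.succ_lt_succ_iff] using hi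
      have key := ih (b :: t) hj
      simp only [List.take_succ_cons, List.drop_succ_cons, List.cons_append,
        List.getD_cons_succ] at key ⊢
      rw [pvCost_cons_cons, key, pvCost_cons_cons]
      ring

-- ===== VERDICT (by name: the statement is the Claim_ definition above) =====
theorem getMinCost_spec : Claim_equal_getMinCost := by
  intro arr _
  show getMinCost arr = getMinCost_alt arr
  simp only [getMinCost, getMinCost_alt, initCost_eq]
  apply PySem.List.foldl_congr_mem
  intro acc i hi
  have hilt : i + 1 < arr.length := by
    have := List.mem_range.mp hi
    omega
  rw [insert_cost i arr _ hilt]
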